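-- pv_equiv track=rewrite | github.com/brighteast99/coding-test-problems | boj/삼성 SW 역량 테스트 기출/마법사 상어와 파이어스톰/solution.py | firestorm
-- ===== SOURCE A (Python) =====
-- ADJACENT_DIRECTIONS = [(-1, 0), (1, 0), (0, -1), (0, 1)]
--
-- def firestorm(board_size, board, l):
--     cell_size = 2**l
--     new_board = [[0] * board_size for _ in range(board_size)]
--
--     for y in range(board_size):
--         for x in range(board_size):
--             base_x, base_y = (x // cell_size) * cell_size, (y // cell_size) * cell_size
--             rel_x, rel_y = x % cell_size, y % cell_size
--
--             new_board[base_y + rel_x][base_x + cell_size - 1 - rel_y] = board[y][x]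
--
--     shrink = set()
--     for y in range(board_size):
--         for x in range(board_size):
--             if new_board[y][x] == 0:
--                 continue
--             adjacent_ice = 0
--             for dx, dy in ADJACENT_DIRECTIONS:
--                 if not (0 <= x + dx < board_size and 0 <= y + dy < board_size):
--                     continue
--                 if new_board[y + dy][x + dx] > 0:
--                     adjacent_ice += 1
--
--             if adjacent_ice < 3:
--                 shrink.add((x, y))
--
--     for x, y in shrink:
--         new_board[y][x] -= 1
--
--     return new_board
-- ===== SOURCE B (Python) =====
-- def firestorm(board_size, board, l):
--     cell_size = 2 ** l
--
--     # Rotation, block by block: slice each cell_size x cell_size sub-block out,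
--     # rotate it 90 degrees clockwise with the zip-transpose idiom, and stitch
--     # the rotated blocks of a band back into full rows.
--     rotated = []
--     by = 0
--     while by < board_size:
--         band_rows = [[] for _ in range(cell_size)]
--         bx = 0
--         while bx < board_size:
--             block = [board[by + i][bx:bx + cell_size] for i in range(cell_size)]
--             rot = [list(t) for t in zip(*block[::-1])]
--             band_rows = [band_rows[i] + rot[i] for i in range(cell_size)]
--             bx += cell_size
--         rotated += band_rows
--         by += cell_size
--
--     # Melt with shifted ice masks: the four neighbor counts are read from four
--     # shifted copies of the ice indicator grid, so all updates are simultaneous.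
--     ice = [[1 if v > 0 else 0 for v in row] for row in rotated]
--     zero_row = [0] * board_size
--     up = ice[1:] + [zero_row]
--     down = [zero_row] + ice[:-1]
--     result = []
--     for y in range(board_size):
--         iy = ice[y]
--         left = [0] + iy[:-1]
--         right = iy[1:] + [0]
--         result.append([v - 1 if v != 0 and up[y][x] + down[y][x] + left[x] + right[x] < 3 else v
--                        for x, v in enumerate(rotated[y])])
--     return result
-- ===== Notes on version B (the rewrite author's own statement) =====
-- stated objective: alternative
-- what changed: A rotates by scattering every source cell through the block-rotation index map into a preallocated grid and then mutates a shrink set back into it; B slices each 2^l x 2^l sub-block out, rotates it with the zip-transpose idiom, stitches the bands back, and melts by summing four shifted copies of an ice-indicator grid instead of counting neighbors per cell, building the result without mutation or a set.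
import Mathlib
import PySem

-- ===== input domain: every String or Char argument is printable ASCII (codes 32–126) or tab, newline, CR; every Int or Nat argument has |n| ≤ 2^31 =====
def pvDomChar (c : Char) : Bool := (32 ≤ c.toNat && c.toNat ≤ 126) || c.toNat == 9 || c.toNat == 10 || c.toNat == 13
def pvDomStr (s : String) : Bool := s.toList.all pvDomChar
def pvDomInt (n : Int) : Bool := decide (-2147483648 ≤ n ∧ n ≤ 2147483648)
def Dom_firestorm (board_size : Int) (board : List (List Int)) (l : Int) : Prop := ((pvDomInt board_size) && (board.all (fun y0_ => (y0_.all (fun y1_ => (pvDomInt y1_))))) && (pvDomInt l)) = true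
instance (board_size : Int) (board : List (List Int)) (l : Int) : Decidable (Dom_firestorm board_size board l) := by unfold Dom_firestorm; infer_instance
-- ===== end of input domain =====

-- B replaces A's per-cell scatter rotation and shrink-set mutation by a block-slice
-- rotation (zip-transpose of each sub-block) and a melt pass whose neighbor counts
-- come from four shifted ice-mask grids (objective: alternative); values agree on Pre_.

-- cell access: g[y][x] with a default (indices are in range on every use under Pre_)
def pyCell (g : List (List Int)) (y x : Int) : Int :=
  PySem.List.pyGetD (PySem.List.pyGetD g y []) x 0

-- ===== PORT A =====
def adjacentDirections : List (Int × Int) := [(-1, 0), (1, 0), (0, -1), (0, 1)]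

-- new_board[y][x] = v
def aWrite (nb : List (List Int)) (y x : Int) (v : Int) : List (List Int) :=
  PySem.List.pySetD nb y (PySem.List.pySetD (PySem.List.pyGetD nb y []) x v)

-- the scatter loop building new_board
def aRotate (board_size : Int) (board : List (List Int)) (cs : Int) : List (List Int) :=
  (PySem.List.pyRange 0 board_size 1).foldl (fun nb y =>
    (PySem.List.pyRange 0 board_size 1).foldl (fun nb x =>
      let baseX := (PySem.Int.floordiv x cs) * cs
      let baseY := (PySem.Int.floordiv y cs) * cs
      let relX := PySem.Int.mod x cs
      let relY := PySem.Int.mod y cs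
      aWrite nb (baseY + relX) (baseX + cs - 1 - relY) (pyCell board y x)) nb)
    (List.replicate board_size.toNat (List.replicate board_size.toNat (0 : Int)))

-- the adjacent_ice counting loop
def aIce (nb : List (List Int)) (board_size x y : Int) : Int :=
  adjacentDirections.foldl (fun acc d =>
    if 0 ≤ x + d.1 ∧ x + d.1 < board_size ∧ 0 ≤ y + d.2 ∧ y + d.2 < board_size then
      (if pyCell nb (y + d.2) (x + d.1) > 0 then acc + 1 else acc)
    else acc) 0

-- the shrink set
def aShrink (nb : List (List Int)) (board_size : Int) : PySem.Set (Int × Int) :=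
  (PySem.List.pyRange 0 board_size 1).foldl (fun s y =>
    (PySem.List.pyRange 0 board_size 1).foldl (fun s x =>
      if pyCell nb y x = 0 then s
      else if aIce nb board_size x y < 3 then PySem.Set.add s (x, y) else s) s)
    PySem.Set.empty

-- NOTE: Python iterates the shrink set in hash order; the decrements hit pairwise
-- distinct cells, so the resulting board does not depend on that order.
-- 2**l: for l < 0 Python produces a float and every later use of it raises; inside
-- Pre_ the exponent is only used when 0 ≤ l, where 2 ^ l.toNat is exact.
def firestorm (board_size : Int) (board : List (List Int)) (l : Int) : List (List Int) :=
  let cell_size : Int := 2 ^ l.toNat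
  let new_board := aRotate board_size board cell_size
  (aShrink new_board board_size).foldl
    (fun nb p => aWrite nb p.2 p.1 (pyCell nb p.2 p.1 - 1)) new_board

-- ===== PORT B =====
-- zip(*rows) for lists of Int rows (truncates to the shortest row; zip() = [])
def zipStar (rows : List (List Int)) : List (List Int) :=
  (List.range ((rows.map List.length).min?.getD 0)).map (fun j => rows.map (fun r => r.getD j 0))

-- [board[b_y + i][bx:bx + cs] for i in range(cs)]  (board[b_y+i] is in range under Pre_)
def bBlock (board : List (List Int)) (b_y bx : Int) (cs : Nat) : List (List Int) :=
  (List.range cs).map (fun (i : Nat) =>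
    PySem.List.slice (PySem.List.pyGetD board (b_y + (i : Int)) []) (some bx) (some (bx + (cs : Int))))

-- inner while loop over block columns; the pointwise append of rot onto band_rows is
-- zipWith (++), exact because both lists have cs rows whenever the loop body runs under Pre_
def bBand (board : List (List Int)) (bs b_y : Int) (cs : Nat) (bx : Int) (rows : List (List Int)) : List (List Int) :=
  if h : bx < bs ∧ 0 < cs then
    let rot := zipStar (bBlock board b_y bx cs).reverse
    bBand board bs b_y cs (bx + cs) (List.zipWith (· ++ ·) rows rot)
  else rows
termination_by (bs - bx).toNat
decreasing_by omega

-- outer while loop over block rows ('0 < cs' only makes the loop total; cs = 2^l ≥ 1 on every call)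
def bBands (board : List (List Int)) (bs : Int) (cs : Nat) (b_y : Int) (acc : List (List Int)) : List (List Int) :=
  if h : b_y < bs ∧ 0 < cs then
    bBands board bs cs (b_y + cs) (acc ++ bBand board bs b_y cs 0 (List.replicate cs []))
  else acc
termination_by (bs - b_y).toNat
decreasing_by omega

-- melt phase: ice masks, shifted copies, one comprehension per row
-- (ice[1:] = drop 1, ice[:-1] = dropLast; the indexed reads are in range under Pre_)
def bMelt (bs : Int) (rotated : List (List Int)) : List (List Int) :=
  let ice := rotated.map (fun row => row.map (fun v => if v > 0 then (1 : Int) else 0))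
  let zrow := List.replicate bs.toNat (0 : Int)
  let up := ice.drop 1 ++ [zrow]
  let down := zrow :: ice.dropLast
  (PySem.List.pyRange 0 bs 1).map (fun y =>
    let iy := PySem.List.pyGetD ice y []
    let left := (0 : Int) :: iy.dropLast
    let right := iy.drop 1 ++ [(0 : Int)]
    (PySem.List.enumerate (PySem.List.pyGetD rotated y []) 0).map (fun xv =>
      if xv.2 ≠ 0 ∧
          PySem.List.pyGetD (PySem.List.pyGetD up y []) xv.1 0
          + PySem.List.pyGetD (PySem.List.pyGetD down y []) xv.1 0
          + PySem.List.pyGetD left xv.1 0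
          + PySem.List.pyGetD right xv.1 0 < 3
      then xv.2 - 1 else xv.2))

def firestorm_alt (board_size : Int) (board : List (List Int)) (l : Int) : List (List Int) :=
  bMelt board_size (bBands board board_size (2 ^ l.toNat) 0 [])

-- ===== PRECONDITION & SPEC =====
-- Pre_ excludes exactly the inputs where Python A raises: with a positive board it
-- needs 0 ≤ l (2**l is a float otherwise, TypeError on indexing), 2^l ∣ board_size
-- (else the rotation writes out of range, IndexError), and a board with at least
-- board_size rows of at least board_size cells each (IndexError otherwise).
def Pre_firestorm (board_size : Int) (board : List (List Int)) (l : Int) : Prop :=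
  board_size ≤ 0 ∨
    (0 ≤ l ∧ ((2 : Int) ^ l.toNat ∣ board_size) ∧
      board_size.toNat ≤ board.length ∧
      ∀ row ∈ board.take board_size.toNat, board_size.toNat ≤ row.length)
instance (board_size : Int) (board : List (List Int)) (l : Int) : Decidable (Pre_firestorm board_size board l) := by unfold Pre_firestorm; infer_instance

def pvWitness_firestorm : Int × List (List Int) × Int := (2, [[1, 2], [3, 4]], 0)

def Spec_firestorm (board_size : Int) (board : List (List Int)) (l : Int) (out : List (List Int)) : Prop := out = firestorm_alt board_size board l
instance (board_size : Int) (board : List (List Int)) (l : Int) (out : List (List Int)) : Decidable (Spec_firestorm board_size board l out) := by unfold Spec_firestorm; infer_instance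

-- ===== CLAIM (what is proved, stated in full; the proofs are below) =====
def Claim_equal_firestorm : Prop := ∀ (board_size : Int) (board : List (List Int)) (l : Int), Dom_firestorm board_size board l → Pre_firestorm board_size board l → Spec_firestorm board_size board l (firestorm board_size board l)

-- ===== LEMMAS AND PROOFS =====

-- proof-side shorthands
def g2N (b : List (List Int)) (Y X : Nat) : Int := (b.getD Y []).getD X 0

def writeN (b : List (List Int)) (r c : Nat) (v : Int) : List (List Int) :=
  b.set r ((b.getD r []).set c v)

def gshape (b : List (List Int)) (N : Nat) : Prop := b.length = N ∧ ∀ r ∈ b, r.length = N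

def gridL (N : Nat) : List (Nat × Nat) :=
  (List.range N).flatMap (fun y => (List.range N).map (fun x => (y, x)))

-- target and source index maps of the block rotation
def tY (C y x : Nat) : Nat := (y / C) * C + x % C
def tX (C y x : Nat) : Nat := (x / C) * C + (C - 1 - y % C)
def sY (C Y X : Nat) : Nat := (Y / C) * C + (C - 1 - X % C)
def sX (C Y X : Nat) : Nat := (X / C) * C + Y % C

def gv (board : List (List Int)) (C Y X : Nat) : Int :=
  (board.getD (sY C Y X) []).getD (sX C Y X) 0

def specGrid (board : List (List Int)) (C N : Nat) : List (List Int) :=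
  (List.range N).map (fun Y => (List.range N).map (fun X => gv board C Y X))

-- the common melted grid both programs compute
def indI (v : Int) : Int := if v > 0 then 1 else 0

def Gg (R : List (List Int)) (bs : Int) (N : Nat) : List (List Int) :=
  (List.range N).map (fun Y => (List.range N).map (fun X =>
    if g2N R Y X ≠ 0 ∧ aIce R bs (X : Int) (Y : Int) < 3 then g2N R Y X - 1 else g2N R Y X))

lemma pyCell_natCast (g : List (List Int)) (y x : Nat) :
    pyCell g (y : Int) (x : Int) = g2N g y x := by
  simp [pyCell, g2N]

lemma aWrite_natCast (nb : List (List Int)) (r c : Nat) (v : Int) :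
    aWrite nb (r : Int) (c : Int) v = writeN nb r c v := by
  simp [aWrite, writeN]

lemma gshape_writeN {v : Int} {b : List (List Int)} {N r c : Nat} (h : gshape b N)
    (hr : r < N) : gshape (writeN b r c v) N := by
  obtain ⟨h1, h2⟩ := h
  refine ⟨by simp [writeN, h1], ?_⟩
  intro row hrow
  rcases List.mem_or_eq_of_mem_set hrow with h | h
  · exact h2 _ h
  · subst h
    have hrb : r < b.length := by omega
    rw [List.getD_eq_getElem b [] hrb]
    simp [h2 _ (List.getElem_mem hrb)]

lemma g2N_writeN {v : Int} {b : List (List Int)} {N r c : Nat} (h : gshape b N)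
    (hr : r < N) (hc : c < N) (Y X : Nat) :
    g2N (writeN b r c v) Y X = if Y = r ∧ X = c then v else g2N b Y X := by
  obtain ⟨h1, h2⟩ := h
  have hrb : r < b.length := by omega
  have hrow : (b.getD r []).length = N := by
    rw [List.getD_eq_getElem b [] hrb]; exact h2 _ (List.getElem_mem hrb)
  by_cases hY : Y = r
  · subst hY
    have hrowset : (writeN b Y c v).getD Y [] = (b.getD Y []).set c v := by
      rw [writeN, List.getD_eq_getElem _ [] (by rw [List.length_set]; omega)]
      exact List.getElem_set_self _
    rw [g2N, hrowset]
    by_cases hX : X = c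
    · subst hX
      rw [if_pos ⟨rfl, rfl⟩, List.getD_eq_getElem _ 0 (by rw [List.length_set]; omega)]
      exact List.getElem_set_self _
    · rw [if_neg (fun h => hX h.2), g2N, List.getD_eq_getElem?_getD (l := (b.getD Y []).set c v),
        List.getElem?_set_ne (fun h => hX h.symm), ← List.getD_eq_getElem?_getD]
  · have hrowkeep : (writeN b r c v).getD Y [] = b.getD Y [] := by
      rw [writeN, List.getD_eq_getElem?_getD, List.getElem?_set_ne (fun h => hY h.symm),
        ← List.getD_eq_getElem?_getD]
    rw [g2N, hrowkeep, if_neg (fun h => hY h.1), g2N]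

lemma gshape_foldl_writeN {N : Nat} (F : Nat × Nat → Int) :
    ∀ (ts : List (Nat × Nat)) (b : List (List Int)), gshape b N →
      (∀ t ∈ ts, t.1 < N ∧ t.2 < N) →
      gshape (ts.foldl (fun b t => writeN b t.1 t.2 (F t)) b) N := by
  intro ts
  induction ts with
  | nil => intro b hb _; simpa using hb
  | cons t ts ih =>
    intro b hb hts
    simp only [List.foldl_cons]
    exact ih _ (gshape_writeN hb (hts t (by simp)).1)
      (fun t' ht' => hts t' (by simp [ht']))

lemma g2N_foldl_writeN {N : Nat} (F : Nat × Nat → Int) :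
    ∀ (ts : List (Nat × Nat)) (b : List (List Int)), gshape b N →
      (∀ t ∈ ts, t.1 < N ∧ t.2 < N) → ∀ Y X : Nat,
      g2N (ts.foldl (fun b t => writeN b t.1 t.2 (F t)) b) Y X
        = if (Y, X) ∈ ts then F (Y, X) else g2N b Y X := by
  intro ts
  induction ts with
  | nil => intro b hb _ Y X; simp
  | cons t ts ih =>
    intro b hb hts Y X
    obtain ⟨ht1, ht2⟩ := hts t (by simp)
    simp only [List.foldl_cons]
    rw [ih _ (gshape_writeN hb ht1) (fun t' ht' => hts t' (by simp [ht'])) Y X]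
    rw [g2N_writeN hb ht1 ht2 Y X]
    by_cases hmem : (Y, X) ∈ ts
    · rw [if_pos hmem, if_pos (by simp [hmem])]
    · by_cases heq : (Y, X) = t
      · have h12 : Y = t.1 ∧ X = t.2 := by cases t; simpa [Prod.ext_iff] using heq
        rw [if_neg hmem, if_pos h12, if_pos (by simp [heq]), heq]
      · have h12 : ¬ (Y = t.1 ∧ X = t.2) := by
          cases t; simpa [Prod.ext_iff] using heq
        rw [if_neg hmem, if_neg h12, if_neg (by simp [heq, hmem])]

-- nested range fold = fold over the flat grid (any state type)
lemma foldl_gridL {β : Type} (N : Nat) (f : β → Nat × Nat → β) (init : β) :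
    (List.range N).foldl (fun s y => (List.range N).foldl (fun s x => f s (y, x)) s) init
      = (gridL N).foldl f init := by
  rw [gridL, List.foldl_flatMap]
  congr 1
  funext s y
  rw [List.foldl_map]

-- casted-range version matching the ports' loops
lemma foldl_gridL' {β : Type} (N : Nat) (f : β → Int → Int → β) (init : β) :
    ((List.range N).map (fun (k : Nat) => (k : Int))).foldl (fun s y =>
        ((List.range N).map (fun (k : Nat) => (k : Int))).foldl (fun s x => f s y x) s) init
      = (gridL N).foldl (fun s p => f s (p.1 : Int) (p.2 : Int)) init := by
  have inner : ∀ (s : β) (y : Int),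
      ((List.range N).map (fun (k : Nat) => (k : Int))).foldl (fun s x => f s y x) s
        = (List.range N).foldl (fun s (x : Nat) => f s y (x : Int)) s :=
    fun s y => List.foldl_map
  calc ((List.range N).map (fun (k : Nat) => (k : Int))).foldl (fun s y =>
        ((List.range N).map (fun (k : Nat) => (k : Int))).foldl (fun s x => f s y x) s) init
      = ((List.range N).map (fun (k : Nat) => (k : Int))).foldl (fun s y =>
        (List.range N).foldl (fun s (x : Nat) => f s y (x : Int)) s) init :=
        PySem.List.foldl_congr_mem _ _ _ _ (fun s y _ => inner s y)
    _ = (List.range N).foldl (fun s (y : Nat) =>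
        (List.range N).foldl (fun s (x : Nat) => f s (y : Int) (x : Int)) s) init := List.foldl_map
    _ = (gridL N).foldl (fun s p => f s (p.1 : Int) (p.2 : Int)) init :=
        foldl_gridL N (fun s p => f s (p.1 : Int) (p.2 : Int)) init

lemma mem_gridL {N : Nat} {p : Nat × Nat} : p ∈ gridL N ↔ p.1 < N ∧ p.2 < N := by
  obtain ⟨a, b⟩ := p
  simp only [gridL, List.mem_flatMap, List.mem_map, List.mem_range, Prod.mk.injEq]
  constructor
  · rintro ⟨y, hy, x, hx, rfl, rfl⟩
    exact ⟨hy, hx⟩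
  · rintro ⟨ha, hb⟩
    exact ⟨a, ha, b, hb, rfl, rfl⟩

-- divmod of q*C + r
lemma dm_div {C : Nat} (hC : 0 < C) (q r : Nat) (hr : r < C) : (q * C + r) / C = q := by
  rw [Nat.mul_comm q C, Nat.mul_add_div hC, Nat.div_eq_of_lt hr]; omega
lemma dm_mod {C : Nat} (q r : Nat) (hr : r < C) : (q * C + r) % C = r := by
  rw [Nat.mul_comm q C, Nat.mul_add_mod, Nat.mod_eq_of_lt hr]

lemma comb_lt {C N a r : Nat} (hdvd : C ∣ N) (ha : a < N) (hr : r < C) :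
    a / C * C + r < N := by
  obtain ⟨k, rfl⟩ := hdvd
  have h1 : a / C < k := Nat.div_lt_of_lt_mul ha
  have h2 : a / C * C + C ≤ k * C := by
    calc a / C * C + C = (a / C + 1) * C := by ring
      _ ≤ k * C := Nat.mul_le_mul_right C h1
  have h3 : k * C = C * k := Nat.mul_comm k C
  omega

lemma s_t {C : Nat} (hC : 0 < C) (y x : Nat) :
    sY C (tY C y x) (tX C y x) = y ∧ sX C (tY C y x) (tX C y x) = x := by
  have hym := Nat.mod_lt y hC
  have hxm := Nat.mod_lt x hC
  have h1 : tY C y x / C = y / C := dm_div hC _ _ hxm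
  have h2 : tY C y x % C = x % C := dm_mod _ _ hxm
  have h3 : tX C y x / C = x / C := dm_div hC _ _ (by omega)
  have h4 : tX C y x % C = C - 1 - y % C := dm_mod _ _ (by omega)
  have hy := Nat.div_add_mod' y C
  have hx := Nat.div_add_mod' x C
  constructor
  · rw [sY, h1, h4]; omega
  · rw [sX, h3, h2]; omega

lemma t_s {C : Nat} (hC : 0 < C) (Y X : Nat) :
    tY C (sY C Y X) (sX C Y X) = Y ∧ tX C (sY C Y X) (sX C Y X) = X := by
  have hYm := Nat.mod_lt Y hC
  have hXm := Nat.mod_lt X hC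
  have h1 : sY C Y X / C = Y / C := dm_div hC _ _ (by omega)
  have h2 : sY C Y X % C = C - 1 - X % C := dm_mod _ _ (by omega)
  have h3 : sX C Y X / C = X / C := dm_div hC _ _ hYm
  have h4 : sX C Y X % C = Y % C := dm_mod _ _ hYm
  have hY := Nat.div_add_mod' Y C
  have hX := Nat.div_add_mod' X C
  constructor
  · rw [tY, h1, h4]; omega
  · rw [tX, h3, h2]; omega

def tgts (C N : Nat) : List (Nat × Nat) := (gridL N).map (fun p => (tY C p.1 p.2, tX C p.1 p.2))

lemma tgt_lt {C N y x : Nat} (hC : 0 < C) (hdvd : C ∣ N) (hy : y < N) (hx : x < N) :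
    tY C y x < N ∧ tX C y x < N :=
  ⟨comb_lt hdvd hy (Nat.mod_lt x hC), comb_lt hdvd hx (by have := Nat.mod_lt y hC; omega)⟩

lemma src_lt {C N Y X : Nat} (hC : 0 < C) (hdvd : C ∣ N) (hY : Y < N) (hX : X < N) :
    sY C Y X < N ∧ sX C Y X < N :=
  ⟨comb_lt hdvd hY (by have := Nat.mod_lt X hC; omega), comb_lt hdvd hX (Nat.mod_lt Y hC)⟩

lemma mem_tgts {C N Y X : Nat} (hC : 0 < C) (hdvd : C ∣ N) :
    (Y, X) ∈ tgts C N ↔ Y < N ∧ X < N := by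
  constructor
  · intro h
    obtain ⟨p, hp, he⟩ := List.mem_map.mp h
    obtain ⟨h1, h2⟩ := mem_gridL.mp hp
    obtain ⟨hl, hr⟩ := tgt_lt (y := p.1) (x := p.2) hC hdvd h1 h2
    cases he
    exact ⟨hl, hr⟩
  · rintro ⟨hY, hX⟩
    refine List.mem_map.mpr ⟨(sY C Y X, sX C Y X), mem_gridL.mpr ?_, ?_⟩
    · exact src_lt hC hdvd hY hX
    · obtain ⟨h1, h2⟩ := t_s hC Y X
      simp [h1, h2]

lemma tgts_lt {C N : Nat} (hC : 0 < C) (hdvd : C ∣ N) :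
    ∀ t ∈ tgts C N, t.1 < N ∧ t.2 < N := by
  intro t ht
  obtain ⟨p, hp, he⟩ := List.mem_map.mp ht
  obtain ⟨h1, h2⟩ := mem_gridL.mp hp
  subst he
  exact tgt_lt hC hdvd h1 h2

-- board equality from shape + cells
lemma eq_of_g2N {b : List (List Int)} {N : Nat} (f : Nat → Nat → Int)
    (hs : gshape b N) (h : ∀ Y X, Y < N → X < N → g2N b Y X = f Y X) :
    b = (List.range N).map (fun Y => (List.range N).map (fun X => f Y X)) := by
  obtain ⟨h1, h2⟩ := hs
  apply List.ext_getElem (by simp [h1])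
  intro i hi _
  have hiN : i < N := by omega
  have hrow : b[i].length = N := h2 _ (List.getElem_mem hi)
  rw [List.getElem_map]
  apply List.ext_getElem (by simp [hrow])
  intro j hj _
  have hjN : j < N := by omega
  have hc := h i j hiN hjN
  rw [g2N, List.getD_eq_getElem b [] hi, List.getD_eq_getElem _ 0 hj] at hc
  simpa using hc

lemma gshape_specGrid (board : List (List Int)) (C N : Nat) :
    gshape (specGrid board C N) N := by
  constructor
  · simp [specGrid]
  · intro r hr
    obtain ⟨Y, _, rfl⟩ := List.mem_map.mp hr
    simp

lemma gshape_replicate (N : Nat) :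
    gshape (List.replicate N (List.replicate N (0 : Int))) N := by
  refine ⟨by simp, ?_⟩
  intro r hr
  rw [List.eq_of_mem_replicate hr]
  simp

-- ===== A: rotation phase =====
lemma aRotate_eq {C : Nat} (hC : 0 < C) (board_size : Int) (board : List (List Int))
    (hdvd : C ∣ board_size.toNat) :
    aRotate board_size board (C : Int) = specGrid board C board_size.toNat := by
  set N := board_size.toNat with hN
  have step1 : aRotate board_size board (C : Int)
      = (gridL N).foldl (fun nb p =>
          aWrite nb (PySem.Int.floordiv (p.1 : Int) (C : Int) * (C : Int) + PySem.Int.mod (p.2 : Int) (C : Int))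
                    (PySem.Int.floordiv (p.2 : Int) (C : Int) * (C : Int) + (C : Int) - 1 - PySem.Int.mod (p.1 : Int) (C : Int))
                    (pyCell board (p.1 : Int) (p.2 : Int)))
          (List.replicate N (List.replicate N (0 : Int))) := by
    rw [aRotate, PySem.List.pyRange_zero]
    exact foldl_gridL' N (fun nb y x =>
      aWrite nb (PySem.Int.floordiv y (C : Int) * (C : Int) + PySem.Int.mod x (C : Int))
                (PySem.Int.floordiv x (C : Int) * (C : Int) + (C : Int) - 1 - PySem.Int.mod y (C : Int))
                (pyCell board y x)) _
  have step2 : ∀ (nb : List (List Int)) (p : Nat × Nat),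
      aWrite nb (PySem.Int.floordiv (p.1 : Int) (C : Int) * (C : Int) + PySem.Int.mod (p.2 : Int) (C : Int))
                (PySem.Int.floordiv (p.2 : Int) (C : Int) * (C : Int) + (C : Int) - 1 - PySem.Int.mod (p.1 : Int) (C : Int))
                (pyCell board (p.1 : Int) (p.2 : Int))
        = (fun nb (t : Nat × Nat) => writeN nb t.1 t.2 (gv board C t.1 t.2)) nb
            (tY C p.1 p.2, tX C p.1 p.2) := by
    intro nb p
    obtain ⟨y, x⟩ := p
    have hym := Nat.mod_lt y hC
    have hxm := Nat.mod_lt x hC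
    have e1 : PySem.Int.floordiv (y : Int) (C : Int) * (C : Int) + PySem.Int.mod (x : Int) (C : Int)
        = ((tY C y x : Nat) : Int) := by
      rw [PySem.Int.floordiv_natCast, PySem.Int.mod_natCast, tY]; push_cast; ring
    have e2 : PySem.Int.floordiv (x : Int) (C : Int) * (C : Int) + (C : Int) - 1 - PySem.Int.mod (y : Int) (C : Int)
        = ((tX C y x : Nat) : Int) := by
      rw [PySem.Int.floordiv_natCast, PySem.Int.mod_natCast, tX]; push_cast; omega
    rw [e1, e2, aWrite_natCast, pyCell_natCast]
    have hst := s_t (y := y) (x := x) hC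
    simp only [gv, hst.1, hst.2, g2N]
  have e : (gridL N).foldl (fun nb p =>
          aWrite nb (PySem.Int.floordiv (p.1 : Int) (C : Int) * (C : Int) + PySem.Int.mod (p.2 : Int) (C : Int))
                    (PySem.Int.floordiv (p.2 : Int) (C : Int) * (C : Int) + (C : Int) - 1 - PySem.Int.mod (p.1 : Int) (C : Int))
                    (pyCell board (p.1 : Int) (p.2 : Int)))
          (List.replicate N (List.replicate N (0 : Int)))
      = (gridL N).foldl (fun nb (p : Nat × Nat) =>
          (fun nb (t : Nat × Nat) => writeN nb t.1 t.2 (gv board C t.1 t.2)) nb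
            (tY C p.1 p.2, tX C p.1 p.2))
          (List.replicate N (List.replicate N (0 : Int))) :=
    PySem.List.foldl_congr_mem _ _ _ _ (fun nb p _ => step2 nb p)
  rw [step1, e]
  have step3 : (tgts C N).foldl (fun nb (t : Nat × Nat) => writeN nb t.1 t.2 (gv board C t.1 t.2))
        (List.replicate N (List.replicate N (0 : Int)))
      = (gridL N).foldl (fun nb (p : Nat × Nat) =>
          (fun nb (t : Nat × Nat) => writeN nb t.1 t.2 (gv board C t.1 t.2)) nb
            (tY C p.1 p.2, tX C p.1 p.2))
        (List.replicate N (List.replicate N (0 : Int))) := by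
    rw [tgts, List.foldl_map]
  rw [← step3]
  refine eq_of_g2N (fun Y X => gv board C Y X)
    (gshape_foldl_writeN (fun t => gv board C t.1 t.2) _ _ (gshape_replicate N) (tgts_lt hC hdvd)) ?_
  intro Y X hY hX
  rw [g2N_foldl_writeN (fun t => gv board C t.1 t.2) _ _ (gshape_replicate N) (tgts_lt hC hdvd) Y X]
  rw [if_pos ((mem_tgts hC hdvd).mpr ⟨hY, hX⟩)]

-- ===== A: melt phase =====
abbrev condN (R : List (List Int)) (bs : Int) (Y X : Nat) : Prop :=
  g2N R Y X ≠ 0 ∧ aIce R bs (X : Int) (Y : Int) < 3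

lemma mem_foldl_add_if {γ : Type} (l : List γ) (c : γ → Prop) [DecidablePred c]
    (φ : γ → Int × Int) :
    ∀ (s0 : PySem.Set (Int × Int)) (p : Int × Int),
      (p ∈ l.foldl (fun s a => if c a then PySem.Set.add s (φ a) else s) s0)
        ↔ p ∈ s0 ∨ ∃ a ∈ l, c a ∧ φ a = p := by
  induction l with
  | nil => intro s0 p; simp
  | cons a l ih =>
    intro s0 p
    simp only [List.foldl_cons]
    by_cases hc : c a
    · rw [if_pos hc, ih]
      rw [PySem.Set.mem_add]
      constructor
      · rintro (⟨h | h⟩ | h)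
        · exact Or.inl h
        · exact Or.inr ⟨a, by simp, hc, h.symm⟩
        · obtain ⟨a', ha', h1, h2⟩ := h
          exact Or.inr ⟨a', by simp [ha'], h1, h2⟩
      · rintro (h | ⟨a', ha', h1, h2⟩)
        · exact Or.inl (Or.inl h)
        · rcases List.mem_cons.mp ha' with rfl | ha'
          · exact Or.inl (Or.inr h2.symm)
          · exact Or.inr ⟨a', ha', h1, h2⟩
    · rw [if_neg hc, ih]
      constructor
      · rintro (h | ⟨a', ha', h1, h2⟩)
        · exact Or.inl h
        · exact Or.inr ⟨a', by simp [ha'], h1, h2⟩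
      · rintro (h | ⟨a', ha', h1, h2⟩)
        · exact Or.inl h
        · rcases List.mem_cons.mp ha' with rfl | ha'
          · exact absurd h1 hc
          · exact Or.inr ⟨a', ha', h1, h2⟩

lemma nodup_foldl_add_if {γ : Type} (l : List γ) (c : γ → Prop) [DecidablePred c]
    (φ : γ → Int × Int) :
    ∀ (s0 : PySem.Set (Int × Int)), s0.Nodup →
      (l.foldl (fun s a => if c a then PySem.Set.add s (φ a) else s) s0).Nodup := by
  induction l with
  | nil => intro s0 h; simpa using h
  | cons a l ih =>
    intro s0 h
    simp only [List.foldl_cons]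
    by_cases hc : c a
    · rw [if_pos hc]; exact ih _ (PySem.Set.nodup_add _ _ h)
    · rw [if_neg hc]; exact ih _ h

lemma aShrink_eq (R : List (List Int)) (bs : Int) :
    aShrink R bs = (gridL bs.toNat).foldl (fun s p =>
      if condN R bs p.1 p.2 then PySem.Set.add s (((p.2 : Nat) : Int), ((p.1 : Nat) : Int)) else s)
      PySem.Set.empty := by
  rw [aShrink, PySem.List.pyRange_zero]
  rw [foldl_gridL' bs.toNat (fun s y x =>
      if pyCell R y x = 0 then s
      else if aIce R bs x y < 3 then PySem.Set.add s (x, y) else s) PySem.Set.empty]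
  apply PySem.List.foldl_congr_mem
  intro s p _
  rw [pyCell_natCast]
  by_cases h0 : g2N R p.1 p.2 = 0
  · rw [if_pos h0, if_neg (by simp [condN, h0])]
  · rw [if_neg h0]
    by_cases h3 : aIce R bs (p.2 : Int) (p.1 : Int) < 3
    · rw [if_pos h3, if_pos ⟨h0, h3⟩]
    · rw [if_neg h3, if_neg (by simp [condN, h3])]

lemma mem_aShrink {R : List (List Int)} {bs : Int} {p : Int × Int} :
    p ∈ aShrink R bs ↔ ∃ Y X : Nat, Y < bs.toNat ∧ X < bs.toNat ∧
      p = ((X : Int), (Y : Int)) ∧ condN R bs Y X := by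
  rw [aShrink_eq, mem_foldl_add_if]
  constructor
  · rintro (h | ⟨a, ha, h1, h2⟩)
    · simp [PySem.Set.empty] at h
    · obtain ⟨hY, hX⟩ := mem_gridL.mp ha
      exact ⟨a.1, a.2, hY, hX, h2.symm, h1⟩
  · rintro ⟨Y, X, hY, hX, rfl, hc⟩
    exact Or.inr ⟨(Y, X), mem_gridL.mpr ⟨hY, hX⟩, hc, rfl⟩

lemma nodup_aShrink (R : List (List Int)) (bs : Int) : (aShrink R bs).Nodup := by
  rw [aShrink_eq]
  exact nodup_foldl_add_if _ _ _ _ (by simp [PySem.Set.empty])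

lemma g2N_foldl_dec {N : Nat} :
    ∀ (sh : List (Int × Int)), sh.Nodup →
      (∀ p ∈ sh, ∃ c r : Nat, p = ((c : Int), (r : Int)) ∧ r < N ∧ c < N) →
      ∀ b, gshape b N → ∀ Y X : Nat, Y < N → X < N →
      g2N (sh.foldl (fun nb p => aWrite nb p.2 p.1 (pyCell nb p.2 p.1 - 1)) b) Y X
        = g2N b Y X - (if ((X : Int), (Y : Int)) ∈ sh then 1 else 0) := by
  intro sh
  induction sh with
  | nil => intro _ _ b _ Y X _ _; simp
  | cons p sh ih =>
    intro hnd hin b hb Y X hY hX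
    obtain ⟨c, r, rfl, hr, hc⟩ := hin p (by simp)
    simp only [List.foldl_cons]
    have hstep : aWrite b ((r : Nat) : Int) ((c : Nat) : Int) (pyCell b ((r : Nat) : Int) ((c : Nat) : Int) - 1)
        = writeN b r c (g2N b r c - 1) := by
      rw [pyCell_natCast, aWrite_natCast]
    rw [hstep]
    rw [ih (List.Nodup.of_cons hnd) (fun q hq => hin q (by simp [hq])) _
        (gshape_writeN hb hr) Y X hY hX]
    rw [g2N_writeN hb hr hc Y X]
    have hmemc : (((X : Nat) : Int), ((Y : Nat) : Int)) ∈ (((c : Nat) : Int), ((r : Nat) : Int)) :: sh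
        ↔ (X = c ∧ Y = r) ∨ (((X : Nat) : Int), ((Y : Nat) : Int)) ∈ sh := by
      simp [Prod.ext_iff, and_comm]
    by_cases heq : Y = r ∧ X = c
    · obtain ⟨rfl, rfl⟩ := heq
      have hnotin : (((X : Nat) : Int), ((Y : Nat) : Int)) ∉ sh := by
        have := List.nodup_cons.mp hnd
        exact this.1
      rw [if_pos (by tauto), if_neg hnotin, if_pos (hmemc.mpr (Or.inl ⟨rfl, rfl⟩))]
      ring
    · rw [if_neg heq]
      by_cases hmem : (((X : Nat) : Int), ((Y : Nat) : Int)) ∈ sh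
      · rw [if_pos hmem, if_pos (hmemc.mpr (Or.inr hmem))]
      · rw [if_neg hmem, if_neg (by rw [hmemc]; tauto)]

lemma gshape_foldl_dec {N : Nat} :
    ∀ (sh : List (Int × Int)),
      (∀ p ∈ sh, ∃ c r : Nat, p = ((c : Int), (r : Int)) ∧ r < N ∧ c < N) →
      ∀ b, gshape b N →
      gshape (sh.foldl (fun nb p => aWrite nb p.2 p.1 (pyCell nb p.2 p.1 - 1)) b) N := by
  intro sh
  induction sh with
  | nil => intro _ b hb; simpa using hb
  | cons p sh ih =>
    intro hin b hb
    obtain ⟨c, r, rfl, hr, hc⟩ := hin p (by simp)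
    simp only [List.foldl_cons]
    have hstep : aWrite b ((r : Nat) : Int) ((c : Nat) : Int) (pyCell b ((r : Nat) : Int) ((c : Nat) : Int) - 1)
        = writeN b r c (g2N b r c - 1) := by
      rw [pyCell_natCast, aWrite_natCast]
    rw [hstep]
    exact ih (fun q hq => hin q (by simp [hq])) _ (gshape_writeN hb hr)

lemma aMelt_eq (R : List (List Int)) (bs : Int) (hR : gshape R bs.toNat) :
    (aShrink R bs).foldl (fun nb p => aWrite nb p.2 p.1 (pyCell nb p.2 p.1 - 1)) R
      = Gg R bs bs.toNat := by
  set N := bs.toNat with hN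
  have hbounds : ∀ p ∈ aShrink R bs, ∃ c r : Nat, p = ((c : Int), (r : Int)) ∧ r < N ∧ c < N := by
    intro p hp
    obtain ⟨Y, X, hY, hX, rfl, _⟩ := mem_aShrink.mp hp
    exact ⟨X, Y, rfl, hY, hX⟩
  refine eq_of_g2N _ (gshape_foldl_dec _ hbounds _ hR) ?_
  intro Y X hY hX
  rw [g2N_foldl_dec _ (nodup_aShrink R bs) hbounds _ hR Y X hY hX]
  have hmem : ((X : Int), (Y : Int)) ∈ aShrink R bs ↔ condN R bs Y X := by
    rw [mem_aShrink]
    constructor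
    · rintro ⟨Y', X', hY', hX', he, hc⟩
      have e1 := congrArg Prod.fst he
      have e2 := congrArg Prod.snd he
      simp only [Nat.cast_inj] at e1 e2
      obtain rfl := e1
      obtain rfl := e2
      exact hc
    · intro hc
      exact ⟨Y, X, hY, hX, rfl, hc⟩
  by_cases hcnd : condN R bs Y X
  · rw [if_pos (hmem.mpr hcnd), if_pos (by exact hcnd)]
  · rw [if_neg (fun h => hcnd (hmem.mp h)), if_neg (by exact hcnd)]
    omega

-- ===== B: rotation phase =====
lemma zipStar_sq (rows : List (List Int)) (n : Nat) (hn : 0 < n) (hlen : rows.length = n)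
    (h : ∀ r ∈ rows, r.length = n) :
    zipStar rows = (List.range n).map (fun j => rows.map (fun r => r.getD j 0)) := by
  have hmap : rows.map List.length = List.replicate n n := by
    apply List.ext_getElem (by simp [hlen])
    intro i hi hi'
    simp only [List.getElem_map, List.getElem_replicate]
    exact h _ (List.getElem_mem _)
  rw [zipStar, hmap, List.min?_replicate_of_pos hn]
  rfl

lemma block_rot (board : List (List Int)) (N C : Nat) (hC : 0 < C)
    (hrows : N ≤ board.length) (hlen : ∀ row ∈ board.take N, N ≤ row.length)
    (qy qx : Nat) (hy : qy * C + C ≤ N) (hx : qx * C + C ≤ N) :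
    zipStar (bBlock board ((qy * C : Nat) : Int) ((qx * C : Nat) : Int) C).reverse
      = (List.range C).map (fun i => (List.range C).map (fun j => gv board C (qy * C + i) (qx * C + j))) := by
  have hrowlen : ∀ k : Nat, k < C → N ≤ (board.getD (qy * C + k) []).length := by
    intro k hk
    have hkN : qy * C + k < N := by omega
    have hkb : qy * C + k < board.length := by omega
    rw [List.getD_eq_getElem board [] hkb]
    have : board[qy * C + k] ∈ board.take N := by
      have h1 : qy * C + k < (board.take N).length := by
        rw [List.length_take]; omega
      have h2 : (board.take N)[qy * C + k] = board[qy * C + k] := List.getElem_take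
      rw [← h2]; exact List.getElem_mem h1
    exact hlen _ this
  have hblk : bBlock board ((qy * C : Nat) : Int) ((qx * C : Nat) : Int) C
      = (List.range C).map (fun i => ((board.getD (qy * C + i) []).drop (qx * C)).take C) := by
    rw [bBlock]
    apply List.map_congr_left
    intro i _
    have e1 : ((qy * C : Nat) : Int) + (i : Int) = ((qy * C + i : Nat) : Int) := by push_cast; ring
    rw [e1, PySem.List.pyGetD_natCast, PySem.List.slice_natCast_add]
  have hblklen : ∀ r ∈ (bBlock board ((qy * C : Nat) : Int) ((qx * C : Nat) : Int) C).reverse,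
      r.length = C := by
    intro r hr
    rw [List.mem_reverse, hblk] at hr
    obtain ⟨i, hi, rfl⟩ := List.mem_map.mp hr
    rw [List.mem_range] at hi
    have := hrowlen i hi
    rw [List.length_take, List.length_drop]
    omega
  rw [hblk] at hblklen ⊢
  rw [zipStar_sq _ C hC (by simp) hblklen]
  have hrev : ((List.range C).map (fun i => ((board.getD (qy * C + i) []).drop (qx * C)).take C)).reverse
      = (List.range C).map (fun k => ((board.getD (qy * C + (C - 1 - k)) []).drop (qx * C)).take C) := by
    apply List.ext_getElem (by simp)
    intro k hk hk'
    simp [List.getElem_reverse]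
  rw [hrev]
  apply List.map_congr_left
  intro i hi
  rw [List.mem_range] at hi
  rw [List.map_map]
  apply List.map_congr_left
  intro j hj
  rw [List.mem_range] at hj
  simp only [Function.comp_apply]
  have hrl := hrowlen (C - 1 - j) (by omega)
  have hlen2 : (((board.getD (qy * C + (C - 1 - j)) []).drop (qx * C)).take C).length = C := by
    rw [List.length_take, List.length_drop]; omega
  rw [List.getD_eq_getElem _ 0 (by rw [hlen2]; exact hi)]
  rw [List.getElem_take, List.getElem_drop]
  have hsY : sY C (qy * C + i) (qx * C + j) = qy * C + (C - 1 - j) := by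
    rw [sY, dm_div hC qy i hi, dm_mod qx j hj]
  have hsX : sX C (qy * C + i) (qx * C + j) = qx * C + i := by
    rw [sX, dm_div hC qx j hj, dm_mod qy i hi]
  rw [gv, hsY, hsX, List.getD_eq_getElem _ 0 (by omega)]

lemma bBand_loop (board : List (List Int)) (N C : Nat) (hC : 0 < C)
    (hrows : N ≤ board.length) (hlen : ∀ row ∈ board.take N, N ≤ row.length)
    (qy : Nat) (hband : qy * C + C ≤ N) :
    ∀ t m : Nat, (m + t) * C = N →
      bBand board (N : Int) ((qy * C : Nat) : Int) C ((m * C : Nat) : Int)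
        ((List.range C).map (fun i => (List.range (m * C)).map (fun j => gv board C (qy * C + i) j)))
      = (List.range C).map (fun i => (List.range N).map (fun j => gv board C (qy * C + i) j)) := by
  intro t
  induction t with
  | zero =>
    intro m hm
    have hmN : m * C = N := by omega
    rw [bBand, dif_neg, hmN]
    rintro ⟨h1, _⟩
    rw [hmN] at h1
    exact lt_irrefl _ h1
  | succ t ih =>
    intro m hm
    have hmc : m * C + C ≤ N := by
      calc m * C + C = (m + 1) * C := by ring
        _ ≤ (m + (t + 1)) * C := Nat.mul_le_mul_right C (by omega)
        _ = N := hm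
    rw [bBand, dif_pos ⟨by exact_mod_cast (show m * C < N by omega), hC⟩]
    simp only []
    rw [block_rot board N C hC hrows hlen qy m hband hmc]
    rw [List.zipWith_map, List.zipWith_self]
    have hrows' : (List.range C).map (fun i =>
        (List.range (m * C)).map (fun j => gv board C (qy * C + i) j)
          ++ (List.range C).map (fun j => gv board C (qy * C + i) (m * C + j)))
        = (List.range C).map (fun i => (List.range ((m + 1) * C)).map (fun j => gv board C (qy * C + i) j)) := by
      apply List.map_congr_left
      intro i _
      rw [show (m + 1) * C = m * C + C from by ring, List.range_add, List.map_append, List.map_map]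
      rfl
    rw [hrows']
    have hbx : ((m * C : Nat) : Int) + (C : Int) = (((m + 1) * C : Nat) : Int) := by push_cast; ring
    rw [hbx]
    exact ih (m + 1) (by rw [show m + 1 + t = m + (t + 1) from by omega]; exact hm)

lemma bBands_loop (board : List (List Int)) (N C : Nat) (hC : 0 < C)
    (hrows : N ≤ board.length) (hlen : ∀ row ∈ board.take N, N ≤ row.length) :
    ∀ t q : Nat, (q + t) * C = N →
      bBands board (N : Int) C ((q * C : Nat) : Int)
        ((List.range (q * C)).map (fun Y => (List.range N).map (fun X => gv board C Y X)))
      = (List.range N).map (fun Y => (List.range N).map (fun X => gv board C Y X)) := by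
  intro t
  induction t with
  | zero =>
    intro q hq
    have hqN : q * C = N := by omega
    rw [bBands, dif_neg, hqN]
    rintro ⟨h1, _⟩
    rw [hqN] at h1
    exact lt_irrefl _ h1
  | succ t ih =>
    intro q hq
    have hband : q * C + C ≤ N := by
      calc q * C + C = (q + 1) * C := by ring
        _ ≤ (q + (t + 1)) * C := Nat.mul_le_mul_right C (by omega)
        _ = N := hq
    rw [bBands, dif_pos ⟨by exact_mod_cast (show q * C < N by omega), hC⟩]
    have h0 : (0 : Int) = ((0 * C : Nat) : Int) := by simp
    have hrep : List.replicate C ([] : List Int)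
        = (List.range C).map (fun i => (List.range (0 * C)).map (fun j => gv board C (q * C + i) j)) := by
      simp
    rw [h0, hrep, bBand_loop board N C hC hrows hlen q hband (q + t + 1) 0
      (by rw [show 0 + (q + t + 1) = q + (t + 1) from by omega]; exact hq)]
    have happ : (List.range (q * C)).map (fun Y => (List.range N).map (fun X => gv board C Y X))
          ++ (List.range C).map (fun i => (List.range N).map (fun j => gv board C (q * C + i) j))
        = (List.range ((q + 1) * C)).map (fun Y => (List.range N).map (fun X => gv board C Y X)) := by
      rw [show (q + 1) * C = q * C + C from by ring, List.range_add, List.map_append, List.map_map]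
      rfl
    rw [happ]
    have hby : ((q * C : Nat) : Int) + (C : Int) = (((q + 1) * C : Nat) : Int) := by push_cast; ring
    rw [hby]
    exact ih (q + 1) (by rw [show q + 1 + t = q + (t + 1) from by omega]; exact hq)

lemma bBands_eq (board : List (List Int)) (N C : Nat) (hC : 0 < C) (hdvd : C ∣ N)
    (hrows : N ≤ board.length) (hlen : ∀ row ∈ board.take N, N ≤ row.length) :
    bBands board (N : Int) C 0 [] = specGrid board C N := by
  obtain ⟨k, hk⟩ := hdvd
  have h := bBands_loop board N C hC hrows hlen k 0 (by rw [Nat.zero_add, Nat.mul_comm]; exact hk.symm)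
  simp only [Nat.zero_mul, List.range_zero, List.map_nil, Nat.cast_zero] at h
  rw [specGrid]
  exact h

-- ===== B: melt phase =====
lemma map_enumerate_eq (row : List Int) (f : Int → Int → Int) :
    (PySem.List.enumerate row 0).map (fun xv => f xv.1 xv.2)
      = (List.range row.length).map (fun (X : Nat) => f (X : Int) (row.getD X 0)) := by
  apply List.ext_getElem (by simp [PySem.List.length_enumerate])
  intro i hi hi'
  have hiR : i < row.length := by simpa [PySem.List.length_enumerate] using hi
  have hiE : i < (PySem.List.enumerate row 0).length := by
    simpa [PySem.List.length_enumerate] using hiR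
  rw [List.getElem_map, List.getElem_map, PySem.List.getElem_enumerate row 0 i hiE, List.getElem_range]
  rw [List.getD_eq_getElem _ 0 hiR]
  norm_num

lemma step_eq (c p : Prop) [Decidable c] [Decidable p] (acc : Int) :
    (if c then (if p then acc + 1 else acc) else acc) = acc + (if c ∧ p then 1 else 0) := by
  by_cases hc : c <;> by_cases hp : p <;> simp [hc, hp]

lemma aIce_eq_inds (R : List (List Int)) (N : Nat) (bs : Int) (hbs : bs = (N : Int))
    (X Y : Nat) (hX : X < N) (hY : Y < N) :
    aIce R bs (X : Int) (Y : Int)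
      = (if 0 < X then indI (g2N R Y (X - 1)) else 0)
      + (if X + 1 < N then indI (g2N R Y (X + 1)) else 0)
      + (if 0 < Y then indI (g2N R (Y - 1) X) else 0)
      + (if Y + 1 < N then indI (g2N R (Y + 1) X) else 0) := by
  subst hbs
  simp only [aIce, adjacentDirections, List.foldl_cons, List.foldl_nil, step_eq]
  have t1 : (if (0 ≤ (X:Int) + -1 ∧ (X:Int) + -1 < (N:Int) ∧ 0 ≤ (Y:Int) + 0 ∧ (Y:Int) + 0 < (N:Int)) ∧ pyCell R ((Y:Int) + 0) ((X:Int) + -1) > 0 then (1:Int) else 0)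
      = if 0 < X then indI (g2N R Y (X - 1)) else 0 := by
    by_cases hx : 0 < X
    · have e1 : ((Y:Int) + 0) = ((Y:Nat):Int) := by omega
      have e2 : ((X:Int) + -1) = (((X - 1 : Nat)):Int) := by omega
      rw [e1, e2, pyCell_natCast]
      by_cases hp : g2N R Y (X - 1) > 0
      · rw [if_pos ⟨⟨by omega, by omega, by omega, by omega⟩, hp⟩, if_pos hx, indI, if_pos hp]
      · rw [if_neg (fun h => hp h.2), if_pos hx, indI, if_neg hp]
    · rw [if_neg (fun h => absurd h.1.1 (by omega)), if_neg hx]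
  have t2 : (if (0 ≤ (X:Int) + 1 ∧ (X:Int) + 1 < (N:Int) ∧ 0 ≤ (Y:Int) + 0 ∧ (Y:Int) + 0 < (N:Int)) ∧ pyCell R ((Y:Int) + 0) ((X:Int) + 1) > 0 then (1:Int) else 0)
      = if X + 1 < N then indI (g2N R Y (X + 1)) else 0 := by
    have e1 : ((Y:Int) + 0) = ((Y:Nat):Int) := by omega
    have e2 : ((X:Int) + 1) = (((X + 1 : Nat)):Int) := by omega
    rw [e1, e2, pyCell_natCast]
    by_cases hx : X + 1 < N
    · by_cases hp : g2N R Y (X + 1) > 0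
      · rw [if_pos ⟨⟨by omega, by omega, by omega, by omega⟩, hp⟩, if_pos hx, indI, if_pos hp]
      · rw [if_neg (fun h => hp h.2), if_pos hx, indI, if_neg hp]
    · rw [if_neg (fun h => absurd h.1.2.1 (by omega)), if_neg hx]
  have t3 : (if (0 ≤ (X:Int) + 0 ∧ (X:Int) + 0 < (N:Int) ∧ 0 ≤ (Y:Int) + -1 ∧ (Y:Int) + -1 < (N:Int)) ∧ pyCell R ((Y:Int) + -1) ((X:Int) + 0) > 0 then (1:Int) else 0)
      = if 0 < Y then indI (g2N R (Y - 1) X) else 0 := by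
    by_cases hy : 0 < Y
    · have e1 : ((Y:Int) + -1) = (((Y - 1 : Nat)):Int) := by omega
      have e2 : ((X:Int) + 0) = ((X:Nat):Int) := by omega
      rw [e1, e2, pyCell_natCast]
      by_cases hp : g2N R (Y - 1) X > 0
      · rw [if_pos ⟨⟨by omega, by omega, by omega, by omega⟩, hp⟩, if_pos hy, indI, if_pos hp]
      · rw [if_neg (fun h => hp h.2), if_pos hy, indI, if_neg hp]
    · rw [if_neg (fun h => absurd h.1.2.2.1 (by omega)), if_neg hy]
  have t4 : (if (0 ≤ (X:Int) + 0 ∧ (X:Int) + 0 < (N:Int) ∧ 0 ≤ (Y:Int) + 1 ∧ (Y:Int) + 1 < (N:Int)) ∧ pyCell R ((Y:Int) + 1) ((X:Int) + 0) > 0 then (1:Int) else 0)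
      = if Y + 1 < N then indI (g2N R (Y + 1) X) else 0 := by
    have e1 : ((Y:Int) + 1) = (((Y + 1 : Nat)):Int) := by omega
    have e2 : ((X:Int) + 0) = ((X:Nat):Int) := by omega
    rw [e1, e2, pyCell_natCast]
    by_cases hy : Y + 1 < N
    · by_cases hp : g2N R (Y + 1) X > 0
      · rw [if_pos ⟨⟨by omega, by omega, by omega, by omega⟩, hp⟩, if_pos hy, indI, if_pos hp]
      · rw [if_neg (fun h => hp h.2), if_pos hy, indI, if_neg hp]
    · rw [if_neg (fun h => absurd h.1.2.2.1 (by omega)), if_neg hy]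
  rw [t1, t2, t3, t4]
  ring

lemma melt_sum (R ice : List (List Int)) (N : Nat) (bs : Int)
    (hR : gshape R N) (hbs : bs = (N : Int))
    (hice : ice = R.map (fun row => row.map (fun v => if v > 0 then (1 : Int) else 0)))
    (Y X : Nat) (hY : Y < N) (hX : X < N) :
    ((ice.drop 1 ++ [List.replicate bs.toNat (0 : Int)]).getD Y []).getD X 0
      + ((List.replicate bs.toNat (0 : Int) :: ice.dropLast).getD Y []).getD X 0
      + ((0 : Int) :: (ice.getD Y []).dropLast).getD X 0
      + ((ice.getD Y []).drop 1 ++ [(0 : Int)]).getD X 0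
      = aIce R bs (X : Int) (Y : Int) := by
  obtain ⟨hRlen, hRrow⟩ := hR
  have hicelen : ice.length = N := by rw [hice]; simp [hRlen]
  have hicecell : ∀ Z W : Nat, Z < N → W < N → (ice.getD Z []).getD W 0 = indI (g2N R Z W) := by
    intro Z W hZ hW
    have hZR : Z < R.length := by omega
    have hrowlen : R[Z].length = N := hRrow _ (List.getElem_mem hZR)
    rw [hice, List.getD_eq_getElem _ [] (by simpa [hRlen] using hZ), List.getElem_map]
    rw [List.getD_eq_getElem _ 0 (by simpa [hrowlen] using hW), List.getElem_map]
    rw [g2N, List.getD_eq_getElem R [] hZR, List.getD_eq_getElem _ 0 (by omega), indI]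
  have hrowice : ∀ Z : Nat, Z < N → (ice.getD Z []).length = N := by
    intro Z hZ
    have hZR : Z < R.length := by omega
    rw [hice, List.getD_eq_getElem _ [] (by simpa [hRlen] using hZ), List.getElem_map, List.length_map]
    exact hRrow _ (List.getElem_mem hZR)
  have hz : ∀ W : Nat, (List.replicate bs.toNat (0:Int)).getD W 0 = 0 := by
    intro W; simp [List.getD]
  have hup : ((ice.drop 1 ++ [List.replicate bs.toNat (0:Int)]).getD Y []).getD X 0
      = if Y + 1 < N then indI (g2N R (Y + 1) X) else 0 := by
    have hlenU : (ice.drop 1 ++ [List.replicate bs.toNat (0:Int)]).length = N - 1 + 1 := by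
      rw [List.length_append, List.length_drop, hicelen]; rfl
    rw [List.getD_eq_getElem (ice.drop 1 ++ [List.replicate bs.toNat (0:Int)]) [] (by omega)]
    by_cases h : Y + 1 < N
    · rw [List.getElem_append_left (by rw [List.length_drop, hicelen]; omega), List.getElem_drop]
      rw [← List.getD_eq_getElem ice [] (by omega)]
      rw [show 1 + Y = Y + 1 from by omega, if_pos h]
      exact hicecell (Y + 1) X h hX
    · rw [List.getElem_append_right (by rw [List.length_drop, hicelen]; omega)]
      simp only [List.getElem_singleton]
      rw [if_neg h]
      exact hz X
  have hdown : ((List.replicate bs.toNat (0:Int) :: ice.dropLast).getD Y []).getD X 0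
      = if 0 < Y then indI (g2N R (Y - 1) X) else 0 := by
    rcases Nat.eq_zero_or_pos Y with hY0 | hY0
    · subst hY0
      rw [List.getD_cons_zero, if_neg (by omega)]
      exact hz X
    · obtain ⟨Y', rfl⟩ : ∃ Y', Y = Y' + 1 := ⟨Y - 1, by omega⟩
      rw [List.getD_cons_succ]
      rw [List.getD_eq_getElem ice.dropLast [] (by rw [List.length_dropLast, hicelen]; omega)]
      rw [List.getElem_dropLast]
      rw [← List.getD_eq_getElem ice [] (by rw [hicelen]; omega)]
      rw [if_pos hY0]
      exact hicecell Y' X (by omega) hX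
  have hleft : ((0 : Int) :: (ice.getD Y []).dropLast).getD X 0
      = if 0 < X then indI (g2N R Y (X - 1)) else 0 := by
    rcases Nat.eq_zero_or_pos X with hX0 | hX0
    · subst hX0
      rw [List.getD_cons_zero, if_neg (by omega)]
    · obtain ⟨X', rfl⟩ : ∃ X', X = X' + 1 := ⟨X - 1, by omega⟩
      rw [List.getD_cons_succ]
      rw [List.getD_eq_getElem (ice.getD Y []).dropLast 0 (by rw [List.length_dropLast, hrowice Y hY]; omega)]
      rw [List.getElem_dropLast]
      rw [← List.getD_eq_getElem (ice.getD Y []) 0 (by rw [hrowice Y hY]; omega)]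
      rw [if_pos hX0]
      exact hicecell Y X' hY (by omega)
  have hright : ((ice.getD Y []).drop 1 ++ [(0 : Int)]).getD X 0
      = if X + 1 < N then indI (g2N R Y (X + 1)) else 0 := by
    have hlenR : ((ice.getD Y []).drop 1 ++ [(0:Int)]).length = N - 1 + 1 := by
      rw [List.length_append, List.length_drop, hrowice Y hY]; rfl
    rw [List.getD_eq_getElem ((ice.getD Y []).drop 1 ++ [(0:Int)]) 0 (by omega)]
    by_cases h : X + 1 < N
    · rw [List.getElem_append_left (by rw [List.length_drop, hrowice Y hY]; omega), List.getElem_drop]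
      rw [← List.getD_eq_getElem (ice.getD Y []) 0 (by rw [hrowice Y hY]; omega)]
      rw [show 1 + X = X + 1 from by omega, if_pos h]
      exact hicecell Y (X + 1) hY h
    · rw [List.getElem_append_right (by rw [List.length_drop, hrowice Y hY]; omega)]
      simp only [List.getElem_singleton]
      rw [if_neg h]
  rw [hup, hdown, hleft, hright, aIce_eq_inds R N bs hbs X Y hX hY]
  ring

lemma bMelt_eq (R : List (List Int)) (N : Nat) (bs : Int) (hR : gshape R N)
    (hbs : bs.toNat = N) :
    bMelt bs R = Gg R bs N := by
  obtain ⟨hRlen, hRrow⟩ := hR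
  simp only [bMelt, Gg]
  rw [PySem.List.pyRange_zero, hbs, List.map_map]
  apply List.map_congr_left
  intro Y hY
  rw [List.mem_range] at hY
  have hbs' : bs = (N : Int) := by omega
  simp only [Function.comp_apply]
  simp only [PySem.List.pyGetD_natCast]
  rw [map_enumerate_eq (R.getD Y []) (fun a b => if b ≠ 0 ∧
      PySem.List.pyGetD (((R.map (fun row => row.map (fun v => if v > 0 then (1:Int) else 0))).drop 1
          ++ [List.replicate N (0:Int)]).getD Y []) a 0
        + PySem.List.pyGetD ((List.replicate N (0:Int)
          :: (R.map (fun row => row.map (fun v => if v > 0 then (1:Int) else 0))).dropLast).getD Y []) a 0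
        + PySem.List.pyGetD ((0:Int) :: ((R.map (fun row => row.map (fun v => if v > 0 then (1:Int) else 0))).getD Y []).dropLast) a 0
        + PySem.List.pyGetD (((R.map (fun row => row.map (fun v => if v > 0 then (1:Int) else 0))).getD Y []).drop 1 ++ [(0:Int)]) a 0 < 3
      then b - 1 else b)]
  have hrlen : (R.getD Y []).length = N := by
    rw [List.getD_eq_getElem R [] (by omega)]
    exact hRrow _ (List.getElem_mem (by omega))
  rw [hrlen]
  apply List.map_congr_left
  intro X hX
  rw [List.mem_range] at hX
  simp only [PySem.List.pyGetD_natCast]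
  have hsum := melt_sum R (R.map (fun row => row.map (fun v => if v > 0 then (1:Int) else 0)))
      N bs ⟨hRlen, hRrow⟩ hbs' rfl Y X hY hX
  rw [hbs] at hsum
  rw [hsum]
  rfl

-- ===== VERDICT (by name: the statement is the Claim_ definition above) =====
theorem firestorm_spec : Claim_equal_firestorm := by
  unfold Claim_equal_firestorm
  intro bs board l _ hpre
  unfold Spec_firestorm
  set C : Nat := 2 ^ l.toNat with hCdef
  set N : Nat := bs.toNat with hNdef
  have hC : 0 < C := Nat.two_pow_pos l.toNat
  have hcs : (2 : Int) ^ l.toNat = ((C : Nat) : Int) := by rw [hCdef]; push_cast; ring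
  have hdvd : C ∣ N := by
    rcases hpre with h | ⟨_, hd, _, _⟩
    · have : N = 0 := by omega
      simp [this]
    · rcases le_or_gt 0 bs with hbs | hbs
      · have : ((C : Nat) : Int) ∣ ((N : Nat) : Int) := by
          rw [hNdef, Int.toNat_of_nonneg hbs, ← hcs]; exact hd
        exact_mod_cast this
      · have : N = 0 := by omega
        simp [this]
  simp only [firestorm, firestorm_alt]
  simp only [hcs]
  rw [aRotate_eq hC bs board hdvd]
  rw [aMelt_eq (specGrid board C N) bs (gshape_specGrid board C N)]
  have hB : bBands board bs C 0 [] = specGrid board C N := by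
    rcases le_or_gt bs 0 with hbs0 | hbs0
    · rw [bBands, dif_neg (by rintro ⟨h1, _⟩; omega)]
      have hN0 : N = 0 := by omega
      simp [specGrid, hN0]
    · have hbsN : bs = (N : Int) := by omega
      rcases hpre with h | ⟨_, _, hrows, hlen⟩
      · omega
      rw [hbsN]
      exact bBands_eq board N C hC hdvd hrows hlen
  rw [hB]
  rw [bMelt_eq (specGrid board C N) N bs (gshape_specGrid board C N) rfl]
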